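-- pv_equiv track=rewrite | github.com/j1ddong/Baekjoon_solve | 프로그래머스/lv2/12951. JadenCase 문자열 만들기/JadenCase 문자열 만들기.py | solution
-- ===== SOURCE A (Python) =====
-- def solution(s):
--     arr = s.split(' ')
--     ans = []
--     for elem in arr:
--         if elem:
--             try:
--                 int(elem[0])
--                 temp = elem[0]
--             except ValueError:
--                 temp = elem[0].upper()
--             temp += elem[1:].lower()
--             ans.append(temp)
--         else:
--             ans.append(elem)
--     return ' '.join(ans)
-- ===== SOURCE B (Python) =====
-- def solution(s):
--     out = []
--     start = True
--     for ch in s: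
--         if ch == ' ':
--             out.append(ch)
--             start = True
--         elif start:
--             out.append(ch if ch.isdigit() else ch.upper())
--             start = False
--         else:
--             out.append(ch.lower())
--     return ''.join(out)
-- ===== Notes on version B (the rewrite author's own statement) =====
-- stated objective: simpler
-- what changed: Replaces split-on-space / per-word fixup / join with a single character pass carrying an at-word-start flag, so no intermediate word list is built.
import Mathlib
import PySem

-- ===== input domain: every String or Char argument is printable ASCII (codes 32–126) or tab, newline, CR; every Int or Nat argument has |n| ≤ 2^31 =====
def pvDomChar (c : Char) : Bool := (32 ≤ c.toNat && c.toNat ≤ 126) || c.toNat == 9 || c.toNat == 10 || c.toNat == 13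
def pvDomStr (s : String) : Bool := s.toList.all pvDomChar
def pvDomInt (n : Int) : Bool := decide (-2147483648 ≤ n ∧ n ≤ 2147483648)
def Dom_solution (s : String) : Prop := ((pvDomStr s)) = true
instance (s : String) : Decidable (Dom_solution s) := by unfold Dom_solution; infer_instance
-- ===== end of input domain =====

-- B does A's job in one pass over the characters with an at-word-start flag instead of split/join: simpler, no word list.

-- ===== PORT A =====
-- per-word body of A's loop: '' is appended unchanged; otherwise try int(elem[0]) decides
-- whether the first char is kept or uppercased, and elem[1:] is lowered
def pyAWord (elem : List Char) : List Char :=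
  match elem with
  | [] => elem
  | c :: _ =>
    let temp := if (PySem.Int.ofChars? [c]).isSome then [c] else PySem.Chars.upper [c]
    temp ++ PySem.Chars.lower (PySem.List.slice elem (some 1) none)

def solution (s : String) : String :=
  String.ofList (PySem.Chars.join [' ']
    ((PySem.Chars.splitOn s.toList [' ']).foldl (fun ans elem => ans ++ [pyAWord elem]) []))

-- ===== PORT B =====
def solution_alt (s : String) : String :=
  let res := s.toList.foldl (fun (st : Bool × List Char) ch =>
    if ch = ' ' then (true, st.2 ++ [ch])
    else if st.1 then (false, st.2 ++ [if PySem.Chars.isdigit ch then ch else PySem.Chars.upperChar ch])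
    else (false, st.2 ++ [PySem.Chars.lowerChar ch])) (true, [])
  String.ofList res.2

-- ===== PRECONDITION & SPEC =====
def Spec_solution (s : String) (out : String) : Prop := out = solution_alt s
instance (s : String) (out : String) : Decidable (Spec_solution s out) := by unfold Spec_solution; infer_instance

-- ===== CLAIM (what is proved, stated in full; the proofs are below) =====
def Claim_equal_solution : Prop := ∀ (s : String), Dom_solution s → Spec_solution s (solution s)

-- ===== LEMMAS AND PROOFS =====

-- simple split of a char list at single spaces: (current word, remaining words)
def splitSp : List Char → List Char × List (List Char)
  | [] => ([], [])
  | c :: cs =>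
    let (h, t) := splitSp cs
    if c = ' ' then ([], h :: t) else (c :: h, t)

lemma splitOn_go_spec (l : List Char) : ∀ (fuel : Nat) (cur : List Char) (acc : List (List Char)),
    l.length < fuel →
    PySem.Chars.splitOn.go [' '] fuel l cur acc
      = acc.reverse ++ ((cur.reverse ++ (splitSp l).1) :: (splitSp l).2) := by
  induction l with
  | nil =>
    intro fuel cur acc h
    cases fuel with
    | zero => omega
    | succ f => simp [PySem.Chars.splitOn.go, splitSp]
  | cons c rest ih =>
    intro fuel cur acc h
    cases fuel with
    | zero => omega
    | succ f =>
      by_cases hc : c = ' '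
      · subst hc
        simp only [PySem.Chars.splitOn.go, List.isPrefixOf, BEq.rfl, Bool.true_and,
          if_pos, List.length_cons, List.length_nil, List.drop_succ_cons, List.drop_zero]
        rw [ih f [] (cur.reverse :: acc) (by simp at h ⊢; omega)]
        simp [splitSp]
      · have hpre : ([' '] : List Char).isPrefixOf (c :: rest) = false := by
          simp [List.isPrefixOf]; exact fun h' => hc h'.symm
        simp only [PySem.Chars.splitOn.go, hpre, Bool.false_eq_true, if_neg, not_false_iff]
        rw [ih f (c :: cur) acc (by simp at h ⊢; omega)]
        simp [splitSp, hc]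

lemma splitOn_eq_splitSp (cs : List Char) :
    PySem.Chars.splitOn cs [' '] = (splitSp cs).1 :: (splitSp cs).2 := by
  have := splitOn_go_spec cs (cs.length + 1) [] [] (by omega)
  simpa [PySem.Chars.splitOn] using this

-- what a single ASCII char int()-parses to: exactly the digits
lemma ofChars_single_isSome (c : Char) (hd : pvDomChar c = true) :
    (PySem.Int.ofChars? [c]).isSome = PySem.Chars.isdigit c := by
  have key : ∀ n : Nat, n < 127 →
      (PySem.Int.ofChars? [Char.ofNat n]).isSome = PySem.Chars.isdigit (Char.ofNat n) := by decide
  have hb : c.toNat < 127 := by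
    simp only [pvDomChar, Bool.or_eq_true, Bool.and_eq_true, decide_eq_true_eq,
      beq_iff_eq] at hd
    omega
  have := key c.toNat hb
  simpa [Char.ofNat_toNat] using this

-- the tail part of A's join, word by word
def tailPart : List (List Char) → List Char
  | [] => []
  | w :: ws => ' ' :: (pyAWord w ++ tailPart ws)

lemma join_map_eq_tailPart (h : List Char) (t : List (List Char)) :
    PySem.Chars.join [' '] ((h :: t).map pyAWord) = pyAWord h ++ tailPart t := by
  induction t generalizing h with
  | nil => simp [PySem.Chars.join, List.intercalate, tailPart]
  | cons w ws ih =>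
    have := ih w
    simp only [List.map_cons, PySem.Chars.join, List.intercalate, List.intersperse] at this ⊢
    simp [tailPart, this]

-- B's loop as structural recursion on the characters
def goB : Bool → List Char → List Char
  | _, [] => []
  | start, ch :: cs =>
    if ch = ' ' then ' ' :: goB true cs
    else if start then (if PySem.Chars.isdigit ch then ch else PySem.Chars.upperChar ch) :: goB false cs
    else PySem.Chars.lowerChar ch :: goB false cs

lemma foldl_eq_goB (cs : List Char) : ∀ (start : Bool) (acc : List Char),
    (cs.foldl (fun (st : Bool × List Char) ch =>
      if ch = ' ' then (true, st.2 ++ [ch])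
      else if st.1 then (false, st.2 ++ [if PySem.Chars.isdigit ch then ch else PySem.Chars.upperChar ch])
      else (false, st.2 ++ [PySem.Chars.lowerChar ch])) (start, acc)).2
      = acc ++ goB start cs := by
  induction cs with
  | nil => intro start acc; simp [goB]
  | cons c rest ih =>
    intro start acc
    by_cases hc : c = ' '
    · subst hc; simp only [List.foldl_cons, goB, ite_true]
      rw [ih true (acc ++ [' '])]; simp
    · cases start with
      | true =>
        simp only [List.foldl_cons, if_neg hc, goB, ite_true]
        rw [ih false]; simp
      | false =>
        simp only [List.foldl_cons, if_neg hc, goB, ite_false, Bool.false_eq_true]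
        rw [ih false]; simp

lemma goB_eq_split (cs : List Char) (hdom : ∀ c ∈ cs, pvDomChar c = true) :
    goB true cs = pyAWord (splitSp cs).1 ++ tailPart (splitSp cs).2
    ∧ goB false cs = PySem.Chars.lower (splitSp cs).1 ++ tailPart (splitSp cs).2 := by
  induction cs with
  | nil => simp [goB, splitSp, pyAWord, PySem.Chars.lower, tailPart]
  | cons c rest ih =>
    have hdr : ∀ x ∈ rest, pvDomChar x = true := fun x hx => hdom x (List.mem_cons_of_mem _ hx)
    obtain ⟨ih1, ih2⟩ := ih hdr
    by_cases hc : c = ' '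
    · subst hc
      constructor <;> simp [goB, splitSp, ih1, pyAWord, tailPart, PySem.Chars.lower]
    · have hd := ofChars_single_isSome c (hdom c (List.mem_cons_self))
      constructor
      · simp only [goB, if_neg hc, splitSp]
        rw [ih2]
        by_cases hdig : PySem.Chars.isdigit c = true
        · simp [pyAWord, hd, hdig, PySem.Chars.lower, PySem.List.slice]
        · simp only [Bool.not_eq_true] at hdig
          simp [pyAWord, hd, hdig, PySem.Chars.lower, PySem.Chars.upper,
            PySem.List.slice]
      · simp only [goB, if_neg hc, splitSp]
        rw [ih2]
        simp [PySem.Chars.lower]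

-- ===== VERDICT (by name: the statement is the Claim_ definition above) =====
theorem solution_spec : Claim_equal_solution := by
  intro s hdom
  unfold Spec_solution solution solution_alt
  have hdc : ∀ c ∈ s.toList, pvDomChar c = true := by
    simpa [Dom_solution, pvDomStr, List.all_eq_true] using hdom
  simp only [foldl_eq_goB s.toList true [], PySem.List.foldl_append_singleton_eq_map,
    splitOn_eq_splitSp, join_map_eq_tailPart, (goB_eq_split s.toList hdc).1,
    List.nil_append]
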